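-- pv_equiv track=rewrite | github.com/udellgroup/Linnaeus_software | webapp/python/library.py | _find_all_oracle_permutations
-- ===== SOURCE A (Python) =====
-- def _moreau_dual(oracle_name):
--     """Return the Moreau dual of an oracle, or None if not applicable.
--
--     Moreau identity: prox_f + prox_fstar = I, so prox_f <-> prox_fstar.
--     """
--     op, func, conj = _decompose_oracle(oracle_name)
--     if op == 'prox':
--         suffix = func + ('star' if not conj else '')
--         return f'prox_{suffix}'
--     return None
--
-- def _find_all_oracle_permutations(user_oracles, lib_oracles,
--                                    allow_moreau=False):
--     """Find all permutations mapping user oracle order to library oracle order.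
--
--     Yields lists perm where user_oracles[perm[i]] == lib_oracles[i].
--     When oracle types repeat (e.g., two grad_f), there are multiple valid
--     permutations; the correct one depends on the transfer function structure.
--
--     If allow_moreau=True, also match Moreau-dual pairs (prox_X <-> prox_Xstar).
--     """
--     if not allow_moreau:
--         if sorted(user_oracles) != sorted(lib_oracles):
--             return
--
--     n = len(lib_oracles)
--     if len(user_oracles) != n:
--         return
--
--     def _compatible(user_o, lib_o):
--         if user_o == lib_o:
--             return True
--         if allow_moreau:
--             dual = _moreau_dual(user_o)
--             if dual is not None and dual == lib_o:
--                 return True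
--         return False
--
--     # Quick check: can all lib oracles be matched?
--     if allow_moreau:
--         from collections import Counter
--         # For each lib oracle, at least one user oracle must be compatible
--         for lo in lib_oracles:
--             if not any(_compatible(uo, lo) for uo in user_oracles):
--                 return
--
--     def _backtrack(pos, used, perm):
--         if pos == n:
--             yield list(perm)
--             return
--         for j in range(n):
--             if j not in used and _compatible(user_oracles[j], lib_oracles[pos]):
--                 used.add(j)
--                 perm.append(j)
--                 yield from _backtrack(pos + 1, used, perm)
--                 perm.pop()
--                 used.discard(j)
--
--     yield from _backtrack(0, set(), [])
--
-- def _decompose_oracle(name):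
--     """Decompose oracle name into (operator, function, is_conjugate).
--
--     Examples:
--         'grad_f'     -> ('grad', 'f', False)
--         'prox_gstar' -> ('prox', 'g', True)
--         'P_C'        -> ('proj', 'C', False)
--     """
--     if name == 'P_C':
--         return ('proj', 'C', False)
--     for prefix in ('prox_', 'grad_'):
--         if name.startswith(prefix):
--             suffix = name[len(prefix):]
--             if suffix.endswith('star'):
--                 return (prefix[:-1], suffix[:-4], True)
--             return (prefix[:-1], suffix, False)
--     return (name, '', False)
-- ===== SOURCE B (Python) =====
-- from itertools import permutations
--
-- def _mdual(oracle_name):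
--     if oracle_name == 'P_C':
--         op, func, conj = ('proj', 'C', False)
--     else:
--         for prefix in ('prox_', 'grad_'):
--             if oracle_name.startswith(prefix):
--                 suffix = oracle_name[len(prefix):]
--                 if suffix.endswith('star'):
--                     op, func, conj = (prefix[:-1], suffix[:-4], True)
--                 else:
--                     op, func, conj = (prefix[:-1], suffix, False)
--                 break
--         else:
--             op, func, conj = (oracle_name, '', False)
--     if op == 'prox':
--         return 'prox_' + func + ('star' if not conj else '')
--     return None
--
-- def _find_all_oracle_permutations(user_oracles, lib_oracles, allow_moreau=False):
--     if not allow_moreau: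
--         if sorted(user_oracles) != sorted(lib_oracles):
--             return
--     n = len(lib_oracles)
--     if len(user_oracles) != n:
--         return
--
--     def _compatible(user_o, lib_o):
--         if user_o == lib_o:
--             return True
--         if allow_moreau:
--             dual = _mdual(user_o)
--             if dual is not None and dual == lib_o:
--                 return True
--         return False
--
--     if allow_moreau:
--         for lo in lib_oracles:
--             if not any(_compatible(uo, lo) for uo in user_oracles):
--                 return
--
--     # Generate-and-filter: lexicographic permutations, keep the compatible ones.
--     for p in permutations(range(n)):
--         if all(_compatible(user_oracles[p[i]], lib_oracles[i]) for i in range(n)):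
--             yield list(p)
-- ===== Notes on version B (the rewrite author's own statement) =====
-- stated objective: idiomatic
-- what changed: The recursive pruned-backtracking generator is replaced by a flat generate-and-filter loop over itertools.permutations(range(n)), which yields the same permutations in the same lexicographic order; the early guards are unchanged.
import Mathlib
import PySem

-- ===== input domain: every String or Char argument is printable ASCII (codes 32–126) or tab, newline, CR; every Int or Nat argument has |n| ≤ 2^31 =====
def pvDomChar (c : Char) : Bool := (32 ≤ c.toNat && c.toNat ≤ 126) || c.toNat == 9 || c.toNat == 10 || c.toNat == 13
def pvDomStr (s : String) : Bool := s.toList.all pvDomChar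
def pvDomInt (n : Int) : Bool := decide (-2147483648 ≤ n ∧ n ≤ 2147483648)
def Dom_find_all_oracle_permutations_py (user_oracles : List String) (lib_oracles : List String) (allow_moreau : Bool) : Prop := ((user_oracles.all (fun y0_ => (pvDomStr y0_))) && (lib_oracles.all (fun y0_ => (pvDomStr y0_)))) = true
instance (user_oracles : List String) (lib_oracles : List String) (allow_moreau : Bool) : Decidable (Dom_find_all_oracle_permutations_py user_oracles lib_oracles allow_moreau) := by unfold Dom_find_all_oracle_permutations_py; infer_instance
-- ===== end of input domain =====

-- B replaces A's recursive pruned backtracking by an idiomatic generate-and-filter over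
-- itertools.permutations(range(n)) (same lexicographic yield order); guards are unchanged.
-- A is a generator; both ports return the list of yielded values.

-- ===== PORT A =====
-- _decompose_oracle (the loop over the two prefixes is unrolled in source order)
def pvDecomposeOracle (name : String) : String × String × Bool :=
  if name == "P_C" then ("proj", "C", false)
  else if PySem.Str.startswith name "prox_" then
    let suffix := PySem.Str.slice name (some 5) none
    if PySem.Str.endswith suffix "star" then ("prox", PySem.Str.slice suffix none (some (-4)), true)
    else ("prox", suffix, false)
  else if PySem.Str.startswith name "grad_" then
    let suffix := PySem.Str.slice name (some 5) none
    if PySem.Str.endswith suffix "star" then ("grad", PySem.Str.slice suffix none (some (-4)), true)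
    else ("grad", suffix, false)
  else (name, "", false)

-- _moreau_dual
def pvMoreauDual (name : String) : Option String :=
  let (op, func, conj) := pvDecomposeOracle name
  if op == "prox" then some ("prox_" ++ (func ++ (if !conj then "star" else ""))) else none

-- the nested _compatible closure (identical text in A and in B; shared by both ports)
def pvCompatible (allow_moreau : Bool) (user_o lib_o : String) : Bool :=
  if user_o == lib_o then true
  else if allow_moreau then
    match pvMoreauDual user_o with
    | some dual => dual == lib_o
    | none => false
  else false

-- the nested generator _backtrack; `fuel` is a totality guard only: every call has fuel = n - pos,
-- and the fuel-0 branch is unreachable (pos = n fires first)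
def pvBacktrack (user_oracles lib_oracles : List String) (allow_moreau : Bool) (n : Nat) :
    Nat → Nat → PySem.Set Nat → List Int → List (List Int)
  | fuel, pos, used, perm =>
    if pos = n then [perm]
    else
      match fuel with
      | 0 => []
      | fuel' + 1 =>
        (List.range n).flatMap (fun j =>
          if !PySem.Set.contains used j &&
              pvCompatible allow_moreau (user_oracles.getD j "") (lib_oracles.getD pos "") then
            pvBacktrack user_oracles lib_oracles allow_moreau n fuel' (pos + 1)
              (PySem.Set.add used j) (perm ++ [(j : Int)])
          else [])

def find_all_oracle_permutations_py (user_oracles : List String) (lib_oracles : List String) (allow_moreau : Bool) : List (List Int) :=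
  if !allow_moreau &&
      !(PySem.List.sorted user_oracles (fun x => x) == PySem.List.sorted lib_oracles (fun x => x)) then []
  else
    let n := lib_oracles.length
    if user_oracles.length ≠ n then []
    else if allow_moreau &&
        lib_oracles.any (fun lo => !(user_oracles.any (fun uo => pvCompatible allow_moreau uo lo))) then []
    else pvBacktrack user_oracles lib_oracles allow_moreau n n 0 PySem.Set.empty []

-- ===== PORT B =====
-- all(_compatible(user_oracles[p[i]], lib_oracles[i]) for i in range(n))
def pvPermCompatAll (user_oracles lib_oracles : List String) (allow_moreau : Bool) (n : Nat) (p : List Nat) : Bool :=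
  (List.range n).all (fun i =>
    pvCompatible allow_moreau (user_oracles.getD (p.getD i 0) "") (lib_oracles.getD i ""))

def find_all_oracle_permutations_py_alt (user_oracles : List String) (lib_oracles : List String) (allow_moreau : Bool) : List (List Int) :=
  if !allow_moreau &&
      !(PySem.List.sorted user_oracles (fun x => x) == PySem.List.sorted lib_oracles (fun x => x)) then []
  else
    let n := lib_oracles.length
    if user_oracles.length ≠ n then []
    else if allow_moreau &&
        lib_oracles.any (fun lo => !(user_oracles.any (fun uo => pvCompatible allow_moreau uo lo))) then []
    else
      (PySem.List.permutations (List.range n) (List.range n).length).filterMap (fun p =>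
        if pvPermCompatAll user_oracles lib_oracles allow_moreau n p then
          some (p.map (fun j => (j : Int)))
        else none)

-- ===== PRECONDITION & SPEC =====
def Spec_find_all_oracle_permutations_py (user_oracles : List String) (lib_oracles : List String) (allow_moreau : Bool) (out : List (List Int)) : Prop := out = find_all_oracle_permutations_py_alt user_oracles lib_oracles allow_moreau
instance (user_oracles : List String) (lib_oracles : List String) (allow_moreau : Bool) (out : List (List Int)) : Decidable (Spec_find_all_oracle_permutations_py user_oracles lib_oracles allow_moreau out) := by unfold Spec_find_all_oracle_permutations_py; infer_instance

-- ===== CLAIM (what is proved, stated in full; the proofs are below) =====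
def Claim_equal_find_all_oracle_permutations_py : Prop := ∀ (user_oracles : List String) (lib_oracles : List String) (allow_moreau : Bool), Dom_find_all_oracle_permutations_py user_oracles lib_oracles allow_moreau → Spec_find_all_oracle_permutations_py user_oracles lib_oracles allow_moreau (find_all_oracle_permutations_py user_oracles lib_oracles allow_moreau)

-- ===== LEMMAS AND PROOFS =====

-- check of the tail positions pos, pos+1, … of a candidate permutation (proof-side view of B's filter)
def pvCheck (user_oracles lib_oracles : List String) (allow_moreau : Bool) : Nat → List Nat → Bool
  | _, [] => true
  | pos, j :: q =>
    pvCompatible allow_moreau (user_oracles.getD j "") (lib_oracles.getD pos "") &&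
      pvCheck user_oracles lib_oracles allow_moreau (pos + 1) q

lemma pvPerms_succ {α : Type} (xs : List α) (r : Nat) :
    PySem.List.permutations xs (r+1)
      = (List.range xs.length).flatMap (fun i => match xs[i]? with
          | none => []
          | some x => (PySem.List.permutations (xs.eraseIdx i) r).map (fun p => x :: p)) := by
  simp [PySem.List.permutations]; rfl

-- index-driven flatMap over a nodup list = value-driven flatMap with erase-by-value
lemma pvFlatMap_idx_erase {α β : Type} [DecidableEq α] (l : List α) (hnd : l.Nodup)
    (H : α → List α → List β) :
    (List.range l.length).flatMap (fun i => match l[i]? with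
        | none => []
        | some x => H x (l.eraseIdx i))
      = l.flatMap (fun x => H x (l.erase x)) := by
  induction l generalizing H with
  | nil => simp
  | cons a t ih =>
    have hnd' : t.Nodup := hnd.of_cons
    have ha : a ∉ t := (List.nodup_cons.mp hnd).1
    rw [List.length_cons, List.range_succ_eq_map, List.flatMap_cons, List.flatMap_map,
      List.flatMap_cons]
    simp only [Nat.succ_eq_add_one, List.getElem?_cons_succ,
      List.eraseIdx_cons_succ, List.getElem?_cons_zero, List.eraseIdx_cons_zero,
      List.erase_cons_head]
    congr 1
    refine (ih hnd' (fun y m => H y (a :: m))).trans ?_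
    apply List.flatMap_congr
    intro x hx
    have hxa : ¬ (a == x) = true := by
      simp only [beq_iff_eq]
      intro h; exact ha (h ▸ hx)
    rw [List.erase_cons_tail hxa]

lemma pvPerms_nodup {α : Type} [DecidableEq α] (l : List α) (hnd : l.Nodup) (r : Nat) :
    PySem.List.permutations l (r+1)
      = l.flatMap (fun x => (PySem.List.permutations (l.erase x) r).map (fun p => x :: p)) := by
  rw [pvPerms_succ]
  exact pvFlatMap_idx_erase l hnd (fun x m => (PySem.List.permutations m r).map (fun p => x :: p))

lemma pvFlatMap_guard {α β : Type} (l : List α) (p q : α → Bool) (f : α → List β) :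
    l.flatMap (fun j => if p j && q j then f j else [])
      = (l.filter p).flatMap (fun j => if q j then f j else []) := by
  induction l with
  | nil => rfl
  | cons a t ih =>
    rw [List.flatMap_cons, List.filter_cons, ih]
    cases hp : p a <;> simp

-- the invariant relating A's backtracking to B's filtered lexicographic permutations
lemma pvCore (uo lo : List String) (am : Bool) (n : Nat) :
    ∀ (fuel pos : Nat) (used : PySem.Set Nat) (perm : List Int) (avail : List Nat),
    avail = (List.range n).filter (fun j => !PySem.Set.contains used j) →
    pos + avail.length = n →
    fuel = avail.length →
    pvBacktrack uo lo am n fuel pos used perm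
      = (PySem.List.permutations avail avail.length).filterMap (fun q =>
          if pvCheck uo lo am pos q then some (perm ++ q.map (fun j => (j : Int))) else none) := by
  intro fuel
  induction fuel with
  | zero =>
    intro pos used perm avail hav hlen hf
    have havnil : avail = [] := List.length_eq_zero_iff.mp hf.symm
    subst havnil
    have hpos : pos = n := by simpa using hlen
    simp [pvBacktrack, hpos, pvCheck]
  | succ fuel ih =>
    intro pos used perm avail hav hlen hf
    have hnodup : avail.Nodup := hav ▸ (List.nodup_range.filter _)
    have hpos : pos ≠ n := by omega
    rw [pvBacktrack]
    simp only [hpos, if_false]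
    have hL : (List.range n).flatMap (fun j =>
        if !PySem.Set.contains used j &&
            pvCompatible am (uo.getD j "") (lo.getD pos "") then
          pvBacktrack uo lo am n fuel (pos + 1) (PySem.Set.add used j) (perm ++ [(j : Int)])
        else [])
        = avail.flatMap (fun j =>
          if pvCompatible am (uo.getD j "") (lo.getD pos "") then
            pvBacktrack uo lo am n fuel (pos + 1) (PySem.Set.add used j) (perm ++ [(j : Int)])
          else []) := by
      rw [pvFlatMap_guard, hav]
    rw [hL, ← hf, pvPerms_nodup avail hnodup fuel, List.filterMap_flatMap]
    apply List.flatMap_congr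
    intro x hx
    have hxused : PySem.Set.contains used x = false := by
      have hm := hav ▸ hx
      simpa using (List.mem_filter.mp hm).2
    have hadd : PySem.Set.add used x = used ++ [x] := by
      simp [PySem.Set.add, PySem.Set.contains] at hxused ⊢
      intro h; exact absurd h hxused
    have hav' : avail.erase x = (List.range n).filter
        (fun j => !PySem.Set.contains (PySem.Set.add used x) j) := by
      rw [hnodup.erase_eq_filter, hav, List.filter_filter, hadd]
      apply List.filter_congr
      intro j _
      simp only [PySem.Set.contains, List.contains_append]
      by_cases h1 : j = x <;> by_cases h2 : j ∈ used <;> simp [h1, h2]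
    have hlen' : (avail.erase x).length = avail.length - 1 := List.length_erase_of_mem hx
    have havpos : 0 < avail.length := List.length_pos_of_mem hx
    rw [List.filterMap_map]
    by_cases hc : pvCompatible am (uo.getD x "") (lo.getD pos "") = true
    · have hc2 : pvCompatible am (uo[x]?.getD "") (lo[pos]?.getD "") = true := hc
      simp only [hc, if_true]
      have hrec := ih (pos + 1) (PySem.Set.add used x) (perm ++ [(x : Int)]) (avail.erase x)
        hav' (by omega) (by omega)
      have he : (avail.erase x).length = fuel := by omega
      rw [he] at hrec
      rw [hrec]
      apply List.filterMap_congr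
      intro q _
      simp [Function.comp, pvCheck, hc2]
    · have hc' : pvCompatible am (uo.getD x "") (lo.getD pos "") = false := by
        simpa using hc
      have hc2 : pvCompatible am (uo[x]?.getD "") (lo[pos]?.getD "") = false := hc'
      simp [Function.comp, pvCheck, hc2]

-- pvCheck from position 0 is exactly B's range-indexed filter, for candidates of length n
lemma pvCheck_eq_all (uo lo : List String) (am : Bool) :
    ∀ (q : List Nat) (pos : Nat),
    pvCheck uo lo am pos q
      = (List.range q.length).all (fun i =>
          pvCompatible am (uo.getD (q.getD i 0) "") (lo.getD (pos + i) "")) := by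
  intro q
  induction q with
  | nil => intro pos; simp [pvCheck]
  | cons x t ih =>
    intro pos
    rw [List.length_cons, List.range_succ_eq_map, List.all_cons, List.all_map, pvCheck,
      ih (pos + 1)]
    congr 1
    apply List.all_congr rfl
    intro i
    simp only [Function.comp, Nat.succ_eq_add_one, List.getD_cons_succ]
    have harith : pos + (i + 1) = pos + 1 + i := by omega
    rw [harith]

-- ===== VERDICT (by name: the statement is the Claim_ definition above) =====
theorem find_all_oracle_permutations_py_spec : Claim_equal_find_all_oracle_permutations_py := by
  intro uo lo am _
  unfold Spec_find_all_oracle_permutations_py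
  unfold find_all_oracle_permutations_py find_all_oracle_permutations_py_alt
  dsimp only
  split_ifs with h1 h2 h3
  · rfl
  · rfl
  · rfl
  · -- main branch: backtracking = filtered lexicographic permutations
    set n := lo.length with hn
    have hav : List.range n = (List.range n).filter
        (fun j => !PySem.Set.contains (PySem.Set.empty (α := Nat)) j) := by
      simp [PySem.Set.empty, PySem.Set.contains]
    rw [pvCore uo lo am n n 0 PySem.Set.empty [] (List.range n) hav (by simp) (by simp)]
    rw [List.length_range]
    apply List.filterMap_congr
    intro q hq
    have hqlen : q.length = n := by
      have hq' : q ∈ PySem.List.permutations (List.range n) (List.range n).length := by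
        simpa using hq
      have hp := PySem.List.perm_of_mem_permutations hq'
      simpa using hp.length_eq
    rw [pvCheck_eq_all]
    simp [pvPermCompatAll, hqlen]
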